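-- pv_equiv track=rewrite | github.com/NRCan/geo-deep-learning | post_process_buildings.py | fix_limits
-- ===== SOURCE A (Python) =====
-- def fix_limits(i_min, i_max, j_min, j_max, min_image_size=256):
--     def closest_divisible_size(size, factor=4):
--         while size % factor:
--             size += 1
--         return size
--
--     height = i_max - i_min
--     width = j_max - j_min
--
--     # pad the rows
--     if height < min_image_size:
--         diff = min_image_size - height
--     else:
--         diff = closest_divisible_size(height) - height + 16
--
--     i_min -= (diff // 2)
--     i_max += (diff // 2 + diff % 2)
--
--     # pad the columns
--     if width < min_image_size:
--         diff = min_image_size - width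
--     else:
--         diff = closest_divisible_size(width) - width + 16
--
--     j_min -= (diff // 2)
--     j_max += (diff // 2 + diff % 2)
--
--     return i_min, i_max, j_min, j_max
-- ===== SOURCE B (Python) =====
-- def fix_limits(i_min, i_max, j_min, j_max, min_image_size=256):
--     def pad(size):
--         # next multiple of 4 in closed form instead of a while-loop search
--         if size < min_image_size:
--             return min_image_size - size
--         return (-size) % 4 + 16
--
--     di = pad(i_max - i_min)
--     dj = pad(j_max - j_min)
--     return (i_min - di // 2, i_max + (di + 1) // 2,
--             j_min - dj // 2, j_max + (dj + 1) // 2)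
-- ===== Notes on version B (the rewrite author's own statement) =====
-- stated objective: simpler
-- what changed: Replaces the while-loop fixpoint search for the next multiple of 4 with the closed form (-size) % 4, and replaces diff//2 + diff%2 with ceiling division (diff+1)//2.
import Mathlib
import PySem

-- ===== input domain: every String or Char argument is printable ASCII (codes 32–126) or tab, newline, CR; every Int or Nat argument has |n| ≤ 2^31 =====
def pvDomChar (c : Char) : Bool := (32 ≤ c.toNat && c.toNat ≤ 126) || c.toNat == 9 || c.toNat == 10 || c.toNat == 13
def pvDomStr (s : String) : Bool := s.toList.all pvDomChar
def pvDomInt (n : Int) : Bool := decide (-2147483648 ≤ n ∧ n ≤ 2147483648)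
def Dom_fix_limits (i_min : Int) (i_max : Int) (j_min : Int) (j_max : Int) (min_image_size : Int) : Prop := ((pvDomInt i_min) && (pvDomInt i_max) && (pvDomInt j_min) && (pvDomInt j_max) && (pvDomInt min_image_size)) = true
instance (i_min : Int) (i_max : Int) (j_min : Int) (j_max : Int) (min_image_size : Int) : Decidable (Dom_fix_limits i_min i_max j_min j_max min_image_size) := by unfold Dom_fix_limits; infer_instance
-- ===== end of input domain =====

-- B replaces A's while-loop search for the next multiple of 4 by the closed form (-size) % 4 (objective: simpler).

-- ===== PORT A =====
-- Python inner helper `closest_divisible_size` with factor fixed to 4 (its only call site).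
def closestDivisibleSize (size : Int) : Int :=
  if PySem.Int.mod size 4 ≠ 0 then closestDivisibleSize (size + 1) else size
termination_by (PySem.Int.mod (-size) 4).toNat
decreasing_by
  have h4 : (0:Int) < 4 := by norm_num
  simp only [PySem.Int.mod_eq_emod_of_pos h4] at *
  omega

def fix_limits (i_min : Int) (i_max : Int) (j_min : Int) (j_max : Int) (min_image_size : Int) : Int × Int × Int × Int :=
  let height := i_max - i_min
  let width := j_max - j_min
  let diff := if height < min_image_size then min_image_size - height
              else closestDivisibleSize height - height + 16
  let i_min := i_min - PySem.Int.floordiv diff 2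
  let i_max := i_max + (PySem.Int.floordiv diff 2 + PySem.Int.mod diff 2)
  let diff := if width < min_image_size then min_image_size - width
              else closestDivisibleSize width - width + 16
  let j_min := j_min - PySem.Int.floordiv diff 2
  let j_max := j_max + (PySem.Int.floordiv diff 2 + PySem.Int.mod diff 2)
  (i_min, i_max, j_min, j_max)

-- ===== PORT B =====
def padAmount (min_image_size : Int) (size : Int) : Int :=
  if size < min_image_size then min_image_size - size
  else PySem.Int.mod (-size) 4 + 16

def fix_limits_alt (i_min : Int) (i_max : Int) (j_min : Int) (j_max : Int) (min_image_size : Int) : Int × Int × Int × Int :=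
  let di := padAmount min_image_size (i_max - i_min)
  let dj := padAmount min_image_size (j_max - j_min)
  (i_min - PySem.Int.floordiv di 2, i_max + PySem.Int.floordiv (di + 1) 2,
   j_min - PySem.Int.floordiv dj 2, j_max + PySem.Int.floordiv (dj + 1) 2)

-- ===== PRECONDITION & SPEC =====
def Spec_fix_limits (i_min : Int) (i_max : Int) (j_min : Int) (j_max : Int) (min_image_size : Int) (out : Int × Int × Int × Int) : Prop := out = fix_limits_alt i_min i_max j_min j_max min_image_size
instance (i_min : Int) (i_max : Int) (j_min : Int) (j_max : Int) (min_image_size : Int) (out : Int × Int × Int × Int) : Decidable (Spec_fix_limits i_min i_max j_min j_max min_image_size out) := by unfold Spec_fix_limits; infer_instance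

-- ===== CLAIM (what is proved, stated in full; the proofs are below) =====
def Claim_equal_fix_limits : Prop := ∀ (i_min : Int) (i_max : Int) (j_min : Int) (j_max : Int) (min_image_size : Int), Dom_fix_limits i_min i_max j_min j_max min_image_size → Spec_fix_limits i_min i_max j_min j_max min_image_size (fix_limits i_min i_max j_min j_max min_image_size)

-- ===== LEMMAS AND PROOFS =====
theorem closestDivisibleSize_eq (size : Int) :
    closestDivisibleSize size = size + PySem.Int.mod (-size) 4 := by
  induction size using closestDivisibleSize.induct with
  | case1 size h ih =>
      rw [closestDivisibleSize, if_pos h, ih]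
      have h4 : (0:Int) < 4 := by norm_num
      simp only [PySem.Int.mod_eq_emod_of_pos h4] at *
      omega
  | case2 size h =>
      rw [closestDivisibleSize, if_neg h]
      have h4 : (0:Int) < 4 := by norm_num
      simp only [PySem.Int.mod_eq_emod_of_pos h4, not_not] at *
      omega

theorem pad_eq (m s : Int) :
    (if s < m then m - s else closestDivisibleSize s - s + 16) = padAmount m s := by
  rw [padAmount]
  split_ifs with h
  · rfl
  · rw [closestDivisibleSize_eq]; ring

theorem halves (d : Int) :
    PySem.Int.floordiv d 2 + PySem.Int.mod d 2 = PySem.Int.floordiv (d + 1) 2 := by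
  have h2 : (0:Int) < 2 := by norm_num
  simp only [PySem.Int.floordiv_eq_ediv_of_pos h2, PySem.Int.mod_eq_emod_of_pos h2]
  omega

-- ===== VERDICT (by name: the statement is the Claim_ definition above) =====
theorem fix_limits_spec : Claim_equal_fix_limits := by
  intro i_min i_max j_min j_max m _
  unfold Spec_fix_limits fix_limits fix_limits_alt
  simp only [pad_eq, halves]
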